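-- pv_equiv track=rewrite | github.com/sevenphone/appium_auto_app | utils/math_util.py | get_keycode
-- ===== SOURCE A (Python) =====
-- def get_keycode(original: str) -> int:
--     """获取要输入的数字或字母的keycode
--     :param original: 原始数字或字母
--     :return: 对应的keycode；如果匹配不到则返回3(HOME)
--     """
--     key = {'0': 7, '1': 8, '2': 9, '3': 10, '4': 11, '5': 12, '6': 13, '7': 14, '8': 15, '9': 16,
--            'a': 29, 'b': 30, 'c': 31, 'd': 32, 'e': 33, 'f': 34, 'g': 35,
--            'h': 36, 'i': 37, 'j': 38, 'k': 39, 'l': 40, 'm': 41, 'n': 42,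
--            'o': 43, 'p': 44, 'q': 45, 'r': 46, 's': 47, 't': 48,
--            'u': 49, 'v': 50, 'w': 51, 'x': 52, 'y': 53, 'z': 54}
--     for k, v in key.items():
--         if k == str(original).strip().replace('\n', '').replace('\r', ''):
--             return v
--     return 3
-- ===== SOURCE B (Python) =====
-- def get_keycode(original: str) -> int:
--     """Same mapping as A, computed by ordinal arithmetic instead of a lookup table."""
--     s = str(original).strip().replace('\n', '').replace('\r', '')
--     if len(s) == 1:
--         if '0' <= s <= '9':
--             return ord(s) - 41
--         if 'a' <= s <= 'z':
--             return ord(s) - 68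
--     return 3
-- ===== Notes on version B (the rewrite author's own statement) =====
-- stated objective: simpler
-- what changed: Replaces the 36-entry dict built and scanned linearly on every call by a single normalization plus a closed-form ordinal formula (ord(s)-41 for digits, ord(s)-68 for lowercase letters, else 3); no table is constructed.
import Mathlib
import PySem

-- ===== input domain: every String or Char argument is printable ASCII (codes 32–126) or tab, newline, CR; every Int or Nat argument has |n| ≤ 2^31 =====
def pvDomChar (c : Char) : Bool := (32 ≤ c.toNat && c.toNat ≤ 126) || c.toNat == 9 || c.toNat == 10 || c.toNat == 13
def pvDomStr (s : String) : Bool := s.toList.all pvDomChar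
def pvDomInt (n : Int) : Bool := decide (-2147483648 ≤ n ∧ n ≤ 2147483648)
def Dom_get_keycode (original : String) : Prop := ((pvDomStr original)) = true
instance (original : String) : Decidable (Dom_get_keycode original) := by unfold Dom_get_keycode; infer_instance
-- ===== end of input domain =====

-- B replaces A's 36-entry dict scan by a closed-form ordinal formula on the normalized string (objective: simpler).

-- ===== PORT A =====
-- the dict literal, as an association list in insertion order
def pvKeyA : List (String × Int) :=
  [("0", 7), ("1", 8), ("2", 9), ("3", 10), ("4", 11), ("5", 12), ("6", 13), ("7", 14), ("8", 15), ("9", 16),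
   ("a", 29), ("b", 30), ("c", 31), ("d", 32), ("e", 33), ("f", 34), ("g", 35),
   ("h", 36), ("i", 37), ("j", 38), ("k", 39), ("l", 40), ("m", 41), ("n", 42),
   ("o", 43), ("p", 44), ("q", 45), ("r", 46), ("s", 47), ("t", 48),
   ("u", 49), ("v", 50), ("w", 51), ("x", 52), ("y", 53), ("z", 54)]

-- the 'for k, v in key.items(): if k == str(original).strip().replace(...).replace(...): return v' loop;
-- A re-normalizes original at every comparison, as the Python does (str(original) is the identity on a str)
def pvLoopA (original : String) : List (String × Int) → Int
  | [] => 3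
  | (k, v) :: rest =>
      if k == PySem.Str.replace (PySem.Str.replace (PySem.Str.strip original) "\n" "") "\r" "" then v
      else pvLoopA original rest

def get_keycode (original : String) : Int := pvLoopA original pvKeyA

-- ===== PORT B =====
def get_keycode_alt (original : String) : Int :=
  let s := PySem.Str.replace (PySem.Str.replace (PySem.Str.strip original) "\n" "") "\r" ""
  -- 'len(s) == 1' guard + the two chained comparisons; ord(s) is the code of the single character
  match s.toList with
  | [c] =>
      if '0' ≤ c ∧ c ≤ '9' then (c.toNat : Int) - 41
      else if 'a' ≤ c ∧ c ≤ 'z' then (c.toNat : Int) - 68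
      else 3
  | _ => 3

-- ===== PRECONDITION & SPEC =====
def Spec_get_keycode (original : String) (out : Int) : Prop := out = get_keycode_alt original
instance (original : String) (out : Int) : Decidable (Spec_get_keycode original out) := by unfold Spec_get_keycode; infer_instance

-- ===== CLAIM (what is proved, stated in full; the proofs are below) =====
def Claim_equal_get_keycode : Prop := ∀ (original : String), Dom_get_keycode original → Spec_get_keycode original (get_keycode original)

-- ===== LEMMAS AND PROOFS =====
lemma char_eq_iff (a b : Char) : (a = b) ↔ a.toNat = b.toNat :=
  ⟨fun h => h ▸ rfl, fun h => Char.ext (UInt32.toNat_inj.mp h)⟩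

lemma char_le_iff (a b : Char) : (a ≤ b) ↔ a.toNat ≤ b.toNat := Iff.rfl

-- proof-side view of A's loop: the comparand hoisted out as a parameter
def pvLookup (t : String) : List (String × Int) → Int
  | [] => 3
  | (k, v) :: rest => if k == t then v else pvLookup t rest

lemma loop_hoist (original : String) (l : List (String × Int)) :
    pvLoopA original l =
      pvLookup (PySem.Str.replace (PySem.Str.replace (PySem.Str.strip original) "\n" "") "\r" "") l := by
  induction l with
  | nil => rfl
  | cons kv rest ih => cases kv; simp only [pvLoopA, pvLookup, ih]

lemma pvKeyEq_0 (t : String) : (("0" : String) = t) ↔ t.toList = ['0'] := by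
  rw [String.ext_iff]; simp [eq_comm]
lemma pvKeyEq_1 (t : String) : (("1" : String) = t) ↔ t.toList = ['1'] := by
  rw [String.ext_iff]; simp [eq_comm]
lemma pvKeyEq_2 (t : String) : (("2" : String) = t) ↔ t.toList = ['2'] := by
  rw [String.ext_iff]; simp [eq_comm]
lemma pvKeyEq_3 (t : String) : (("3" : String) = t) ↔ t.toList = ['3'] := by
  rw [String.ext_iff]; simp [eq_comm]
lemma pvKeyEq_4 (t : String) : (("4" : String) = t) ↔ t.toList = ['4'] := by
  rw [String.ext_iff]; simp [eq_comm]
lemma pvKeyEq_5 (t : String) : (("5" : String) = t) ↔ t.toList = ['5'] := by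
  rw [String.ext_iff]; simp [eq_comm]
lemma pvKeyEq_6 (t : String) : (("6" : String) = t) ↔ t.toList = ['6'] := by
  rw [String.ext_iff]; simp [eq_comm]
lemma pvKeyEq_7 (t : String) : (("7" : String) = t) ↔ t.toList = ['7'] := by
  rw [String.ext_iff]; simp [eq_comm]
lemma pvKeyEq_8 (t : String) : (("8" : String) = t) ↔ t.toList = ['8'] := by
  rw [String.ext_iff]; simp [eq_comm]
lemma pvKeyEq_9 (t : String) : (("9" : String) = t) ↔ t.toList = ['9'] := by
  rw [String.ext_iff]; simp [eq_comm]
lemma pvKeyEq_10 (t : String) : (("a" : String) = t) ↔ t.toList = ['a'] := by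
  rw [String.ext_iff]; simp [eq_comm]
lemma pvKeyEq_11 (t : String) : (("b" : String) = t) ↔ t.toList = ['b'] := by
  rw [String.ext_iff]; simp [eq_comm]
lemma pvKeyEq_12 (t : String) : (("c" : String) = t) ↔ t.toList = ['c'] := by
  rw [String.ext_iff]; simp [eq_comm]
lemma pvKeyEq_13 (t : String) : (("d" : String) = t) ↔ t.toList = ['d'] := by
  rw [String.ext_iff]; simp [eq_comm]
lemma pvKeyEq_14 (t : String) : (("e" : String) = t) ↔ t.toList = ['e'] := by
  rw [String.ext_iff]; simp [eq_comm]
lemma pvKeyEq_15 (t : String) : (("f" : String) = t) ↔ t.toList = ['f'] := by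
  rw [String.ext_iff]; simp [eq_comm]
lemma pvKeyEq_16 (t : String) : (("g" : String) = t) ↔ t.toList = ['g'] := by
  rw [String.ext_iff]; simp [eq_comm]
lemma pvKeyEq_17 (t : String) : (("h" : String) = t) ↔ t.toList = ['h'] := by
  rw [String.ext_iff]; simp [eq_comm]
lemma pvKeyEq_18 (t : String) : (("i" : String) = t) ↔ t.toList = ['i'] := by
  rw [String.ext_iff]; simp [eq_comm]
lemma pvKeyEq_19 (t : String) : (("j" : String) = t) ↔ t.toList = ['j'] := by
  rw [String.ext_iff]; simp [eq_comm]
lemma pvKeyEq_20 (t : String) : (("k" : String) = t) ↔ t.toList = ['k'] := by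
  rw [String.ext_iff]; simp [eq_comm]
lemma pvKeyEq_21 (t : String) : (("l" : String) = t) ↔ t.toList = ['l'] := by
  rw [String.ext_iff]; simp [eq_comm]
lemma pvKeyEq_22 (t : String) : (("m" : String) = t) ↔ t.toList = ['m'] := by
  rw [String.ext_iff]; simp [eq_comm]
lemma pvKeyEq_23 (t : String) : (("n" : String) = t) ↔ t.toList = ['n'] := by
  rw [String.ext_iff]; simp [eq_comm]
lemma pvKeyEq_24 (t : String) : (("o" : String) = t) ↔ t.toList = ['o'] := by
  rw [String.ext_iff]; simp [eq_comm]
lemma pvKeyEq_25 (t : String) : (("p" : String) = t) ↔ t.toList = ['p'] := by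
  rw [String.ext_iff]; simp [eq_comm]
lemma pvKeyEq_26 (t : String) : (("q" : String) = t) ↔ t.toList = ['q'] := by
  rw [String.ext_iff]; simp [eq_comm]
lemma pvKeyEq_27 (t : String) : (("r" : String) = t) ↔ t.toList = ['r'] := by
  rw [String.ext_iff]; simp [eq_comm]
lemma pvKeyEq_28 (t : String) : (("s" : String) = t) ↔ t.toList = ['s'] := by
  rw [String.ext_iff]; simp [eq_comm]
lemma pvKeyEq_29 (t : String) : (("t" : String) = t) ↔ t.toList = ['t'] := by
  rw [String.ext_iff]; simp [eq_comm]
lemma pvKeyEq_30 (t : String) : (("u" : String) = t) ↔ t.toList = ['u'] := by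
  rw [String.ext_iff]; simp [eq_comm]
lemma pvKeyEq_31 (t : String) : (("v" : String) = t) ↔ t.toList = ['v'] := by
  rw [String.ext_iff]; simp [eq_comm]
lemma pvKeyEq_32 (t : String) : (("w" : String) = t) ↔ t.toList = ['w'] := by
  rw [String.ext_iff]; simp [eq_comm]
lemma pvKeyEq_33 (t : String) : (("x" : String) = t) ↔ t.toList = ['x'] := by
  rw [String.ext_iff]; simp [eq_comm]
lemma pvKeyEq_34 (t : String) : (("y" : String) = t) ↔ t.toList = ['y'] := by
  rw [String.ext_iff]; simp [eq_comm]
lemma pvKeyEq_35 (t : String) : (("z" : String) = t) ↔ t.toList = ['z'] := by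
  rw [String.ext_iff]; simp [eq_comm]

set_option maxHeartbeats 4000000 in
lemma lookup_closed (t : String) :
    pvLookup t pvKeyA = (match t.toList with
      | [c] =>
          if '0' ≤ c ∧ c ≤ '9' then (c.toNat : Int) - 41
          else if 'a' ≤ c ∧ c ≤ 'z' then (c.toNat : Int) - 68
          else 3
      | _ => 3) := by
  simp only [pvLookup, pvKeyA, beq_iff_eq, pvKeyEq_0, pvKeyEq_1, pvKeyEq_2, pvKeyEq_3, pvKeyEq_4, pvKeyEq_5, pvKeyEq_6, pvKeyEq_7, pvKeyEq_8, pvKeyEq_9, pvKeyEq_10, pvKeyEq_11, pvKeyEq_12, pvKeyEq_13, pvKeyEq_14, pvKeyEq_15, pvKeyEq_16, pvKeyEq_17, pvKeyEq_18, pvKeyEq_19, pvKeyEq_20, pvKeyEq_21, pvKeyEq_22, pvKeyEq_23, pvKeyEq_24, pvKeyEq_25, pvKeyEq_26, pvKeyEq_27, pvKeyEq_28, pvKeyEq_29, pvKeyEq_30, pvKeyEq_31, pvKeyEq_32, pvKeyEq_33, pvKeyEq_34, pvKeyEq_35]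
  generalize t.toList = m
  rcases m with _ | ⟨c, _ | ⟨c2, rest⟩⟩
  · simp only [reduceCtorEq, if_false]
  · simp only [List.cons.injEq, and_true]
    simp only [char_eq_iff, char_le_iff]
    simp only [Char.reduceToNat]
    by_cases h0 : c.toNat = 48
    · rw [if_pos h0, if_pos (show 48 ≤ c.toNat ∧ c.toNat ≤ 57 by omega)]
      omega
    rw [if_neg h0]
    by_cases h1 : c.toNat = 49
    · rw [if_pos h1, if_pos (show 48 ≤ c.toNat ∧ c.toNat ≤ 57 by omega)]
      omega
    rw [if_neg h1]
    by_cases h2 : c.toNat = 50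
    · rw [if_pos h2, if_pos (show 48 ≤ c.toNat ∧ c.toNat ≤ 57 by omega)]
      omega
    rw [if_neg h2]
    by_cases h3 : c.toNat = 51
    · rw [if_pos h3, if_pos (show 48 ≤ c.toNat ∧ c.toNat ≤ 57 by omega)]
      omega
    rw [if_neg h3]
    by_cases h4 : c.toNat = 52
    · rw [if_pos h4, if_pos (show 48 ≤ c.toNat ∧ c.toNat ≤ 57 by omega)]
      omega
    rw [if_neg h4]
    by_cases h5 : c.toNat = 53
    · rw [if_pos h5, if_pos (show 48 ≤ c.toNat ∧ c.toNat ≤ 57 by omega)]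
      omega
    rw [if_neg h5]
    by_cases h6 : c.toNat = 54
    · rw [if_pos h6, if_pos (show 48 ≤ c.toNat ∧ c.toNat ≤ 57 by omega)]
      omega
    rw [if_neg h6]
    by_cases h7 : c.toNat = 55
    · rw [if_pos h7, if_pos (show 48 ≤ c.toNat ∧ c.toNat ≤ 57 by omega)]
      omega
    rw [if_neg h7]
    by_cases h8 : c.toNat = 56
    · rw [if_pos h8, if_pos (show 48 ≤ c.toNat ∧ c.toNat ≤ 57 by omega)]
      omega
    rw [if_neg h8]
    by_cases h9 : c.toNat = 57
    · rw [if_pos h9, if_pos (show 48 ≤ c.toNat ∧ c.toNat ≤ 57 by omega)]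
      omega
    rw [if_neg h9]
    by_cases h10 : c.toNat = 97
    · rw [if_pos h10, if_neg (show ¬(48 ≤ c.toNat ∧ c.toNat ≤ 57) by omega), if_pos (show 97 ≤ c.toNat ∧ c.toNat ≤ 122 by omega)]
      omega
    rw [if_neg h10]
    by_cases h11 : c.toNat = 98
    · rw [if_pos h11, if_neg (show ¬(48 ≤ c.toNat ∧ c.toNat ≤ 57) by omega), if_pos (show 97 ≤ c.toNat ∧ c.toNat ≤ 122 by omega)]
      omega
    rw [if_neg h11]
    by_cases h12 : c.toNat = 99
    · rw [if_pos h12, if_neg (show ¬(48 ≤ c.toNat ∧ c.toNat ≤ 57) by omega), if_pos (show 97 ≤ c.toNat ∧ c.toNat ≤ 122 by omega)]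
      omega
    rw [if_neg h12]
    by_cases h13 : c.toNat = 100
    · rw [if_pos h13, if_neg (show ¬(48 ≤ c.toNat ∧ c.toNat ≤ 57) by omega), if_pos (show 97 ≤ c.toNat ∧ c.toNat ≤ 122 by omega)]
      omega
    rw [if_neg h13]
    by_cases h14 : c.toNat = 101
    · rw [if_pos h14, if_neg (show ¬(48 ≤ c.toNat ∧ c.toNat ≤ 57) by omega), if_pos (show 97 ≤ c.toNat ∧ c.toNat ≤ 122 by omega)]
      omega
    rw [if_neg h14]
    by_cases h15 : c.toNat = 102
    · rw [if_pos h15, if_neg (show ¬(48 ≤ c.toNat ∧ c.toNat ≤ 57) by omega), if_pos (show 97 ≤ c.toNat ∧ c.toNat ≤ 122 by omega)]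
      omega
    rw [if_neg h15]
    by_cases h16 : c.toNat = 103
    · rw [if_pos h16, if_neg (show ¬(48 ≤ c.toNat ∧ c.toNat ≤ 57) by omega), if_pos (show 97 ≤ c.toNat ∧ c.toNat ≤ 122 by omega)]
      omega
    rw [if_neg h16]
    by_cases h17 : c.toNat = 104
    · rw [if_pos h17, if_neg (show ¬(48 ≤ c.toNat ∧ c.toNat ≤ 57) by omega), if_pos (show 97 ≤ c.toNat ∧ c.toNat ≤ 122 by omega)]
      omega
    rw [if_neg h17]
    by_cases h18 : c.toNat = 105
    · rw [if_pos h18, if_neg (show ¬(48 ≤ c.toNat ∧ c.toNat ≤ 57) by omega), if_pos (show 97 ≤ c.toNat ∧ c.toNat ≤ 122 by omega)]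
      omega
    rw [if_neg h18]
    by_cases h19 : c.toNat = 106
    · rw [if_pos h19, if_neg (show ¬(48 ≤ c.toNat ∧ c.toNat ≤ 57) by omega), if_pos (show 97 ≤ c.toNat ∧ c.toNat ≤ 122 by omega)]
      omega
    rw [if_neg h19]
    by_cases h20 : c.toNat = 107
    · rw [if_pos h20, if_neg (show ¬(48 ≤ c.toNat ∧ c.toNat ≤ 57) by omega), if_pos (show 97 ≤ c.toNat ∧ c.toNat ≤ 122 by omega)]
      omega
    rw [if_neg h20]
    by_cases h21 : c.toNat = 108
    · rw [if_pos h21, if_neg (show ¬(48 ≤ c.toNat ∧ c.toNat ≤ 57) by omega), if_pos (show 97 ≤ c.toNat ∧ c.toNat ≤ 122 by omega)]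
      omega
    rw [if_neg h21]
    by_cases h22 : c.toNat = 109
    · rw [if_pos h22, if_neg (show ¬(48 ≤ c.toNat ∧ c.toNat ≤ 57) by omega), if_pos (show 97 ≤ c.toNat ∧ c.toNat ≤ 122 by omega)]
      omega
    rw [if_neg h22]
    by_cases h23 : c.toNat = 110
    · rw [if_pos h23, if_neg (show ¬(48 ≤ c.toNat ∧ c.toNat ≤ 57) by omega), if_pos (show 97 ≤ c.toNat ∧ c.toNat ≤ 122 by omega)]
      omega
    rw [if_neg h23]
    by_cases h24 : c.toNat = 111
    · rw [if_pos h24, if_neg (show ¬(48 ≤ c.toNat ∧ c.toNat ≤ 57) by omega), if_pos (show 97 ≤ c.toNat ∧ c.toNat ≤ 122 by omega)]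
      omega
    rw [if_neg h24]
    by_cases h25 : c.toNat = 112
    · rw [if_pos h25, if_neg (show ¬(48 ≤ c.toNat ∧ c.toNat ≤ 57) by omega), if_pos (show 97 ≤ c.toNat ∧ c.toNat ≤ 122 by omega)]
      omega
    rw [if_neg h25]
    by_cases h26 : c.toNat = 113
    · rw [if_pos h26, if_neg (show ¬(48 ≤ c.toNat ∧ c.toNat ≤ 57) by omega), if_pos (show 97 ≤ c.toNat ∧ c.toNat ≤ 122 by omega)]
      omega
    rw [if_neg h26]
    by_cases h27 : c.toNat = 114
    · rw [if_pos h27, if_neg (show ¬(48 ≤ c.toNat ∧ c.toNat ≤ 57) by omega), if_pos (show 97 ≤ c.toNat ∧ c.toNat ≤ 122 by omega)]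
      omega
    rw [if_neg h27]
    by_cases h28 : c.toNat = 115
    · rw [if_pos h28, if_neg (show ¬(48 ≤ c.toNat ∧ c.toNat ≤ 57) by omega), if_pos (show 97 ≤ c.toNat ∧ c.toNat ≤ 122 by omega)]
      omega
    rw [if_neg h28]
    by_cases h29 : c.toNat = 116
    · rw [if_pos h29, if_neg (show ¬(48 ≤ c.toNat ∧ c.toNat ≤ 57) by omega), if_pos (show 97 ≤ c.toNat ∧ c.toNat ≤ 122 by omega)]
      omega
    rw [if_neg h29]
    by_cases h30 : c.toNat = 117
    · rw [if_pos h30, if_neg (show ¬(48 ≤ c.toNat ∧ c.toNat ≤ 57) by omega), if_pos (show 97 ≤ c.toNat ∧ c.toNat ≤ 122 by omega)]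
      omega
    rw [if_neg h30]
    by_cases h31 : c.toNat = 118
    · rw [if_pos h31, if_neg (show ¬(48 ≤ c.toNat ∧ c.toNat ≤ 57) by omega), if_pos (show 97 ≤ c.toNat ∧ c.toNat ≤ 122 by omega)]
      omega
    rw [if_neg h31]
    by_cases h32 : c.toNat = 119
    · rw [if_pos h32, if_neg (show ¬(48 ≤ c.toNat ∧ c.toNat ≤ 57) by omega), if_pos (show 97 ≤ c.toNat ∧ c.toNat ≤ 122 by omega)]
      omega
    rw [if_neg h32]
    by_cases h33 : c.toNat = 120
    · rw [if_pos h33, if_neg (show ¬(48 ≤ c.toNat ∧ c.toNat ≤ 57) by omega), if_pos (show 97 ≤ c.toNat ∧ c.toNat ≤ 122 by omega)]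
      omega
    rw [if_neg h33]
    by_cases h34 : c.toNat = 121
    · rw [if_pos h34, if_neg (show ¬(48 ≤ c.toNat ∧ c.toNat ≤ 57) by omega), if_pos (show 97 ≤ c.toNat ∧ c.toNat ≤ 122 by omega)]
      omega
    rw [if_neg h34]
    by_cases h35 : c.toNat = 122
    · rw [if_pos h35, if_neg (show ¬(48 ≤ c.toNat ∧ c.toNat ≤ 57) by omega), if_pos (show 97 ≤ c.toNat ∧ c.toNat ≤ 122 by omega)]
      omega
    rw [if_neg h35]
    rw [if_neg (show ¬(48 ≤ c.toNat ∧ c.toNat ≤ 57) by omega), if_neg (show ¬(97 ≤ c.toNat ∧ c.toNat ≤ 122) by omega)]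
  · simp only [List.cons.injEq, reduceCtorEq, and_false, if_false]

lemma ab_eq (original : String) : get_keycode original = get_keycode_alt original := by
  simp only [get_keycode, get_keycode_alt, loop_hoist, lookup_closed]

-- ===== VERDICT (by name: the statement is the Claim_ definition above) =====
theorem get_keycode_spec : Claim_equal_get_keycode := by
  intro original _
  unfold Spec_get_keycode
  exact ab_eq original
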